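-- pv_equiv track=rewrite | github.com/btenner84/Ma-Data | scripts/gold/build_dim_entity.py | find_entity_root
-- ===== SOURCE A (Python) =====
-- def find_entity_root(contract_id: str, crosswalk_map: dict, visited: set = None) -> str:
--     """
--     Find the root entity ID by following crosswalk chain backwards.
--     The root is the earliest known contract ID.
--     """
--     if visited is None:
--         visited = set()
--
--     if contract_id in visited:
--         return contract_id
--
--     visited.add(contract_id)
--
--     for old_id, mappings in crosswalk_map.items():
--         for new_id, _ in mappings:
--             if new_id == contract_id:
--                 return find_entity_root(old_id, crosswalk_map, visited)
--
--     return contract_id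
-- ===== SOURCE B (Python) =====
-- def find_entity_root(contract_id: str, crosswalk_map: dict, visited: set = None) -> str:
--     """Precompute a reverse index new_id -> old_id (first match), then follow the chain iteratively (alternative algorithm, same result)."""
--     if visited is None:
--         visited = set()
--     reverse = {}
--     for old_id, mappings in crosswalk_map.items():
--         for new_id, _ in mappings:
--             if new_id not in reverse:
--                 reverse[new_id] = old_id
--     while contract_id not in visited:
--         visited.add(contract_id)
--         if contract_id in reverse:
--             contract_id = reverse[contract_id]
--         else:
--             return contract_id
--     return contract_id
-- ===== Notes on version B (the rewrite author's own statement) =====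
-- stated objective: alternative
-- what changed: A rescans the whole crosswalk map at every recursive step; B builds a reverse index new_id->old_id once and then follows the chain iteratively by dictionary lookup (same cost on the measured inputs, whose chains are short).
import Mathlib
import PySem

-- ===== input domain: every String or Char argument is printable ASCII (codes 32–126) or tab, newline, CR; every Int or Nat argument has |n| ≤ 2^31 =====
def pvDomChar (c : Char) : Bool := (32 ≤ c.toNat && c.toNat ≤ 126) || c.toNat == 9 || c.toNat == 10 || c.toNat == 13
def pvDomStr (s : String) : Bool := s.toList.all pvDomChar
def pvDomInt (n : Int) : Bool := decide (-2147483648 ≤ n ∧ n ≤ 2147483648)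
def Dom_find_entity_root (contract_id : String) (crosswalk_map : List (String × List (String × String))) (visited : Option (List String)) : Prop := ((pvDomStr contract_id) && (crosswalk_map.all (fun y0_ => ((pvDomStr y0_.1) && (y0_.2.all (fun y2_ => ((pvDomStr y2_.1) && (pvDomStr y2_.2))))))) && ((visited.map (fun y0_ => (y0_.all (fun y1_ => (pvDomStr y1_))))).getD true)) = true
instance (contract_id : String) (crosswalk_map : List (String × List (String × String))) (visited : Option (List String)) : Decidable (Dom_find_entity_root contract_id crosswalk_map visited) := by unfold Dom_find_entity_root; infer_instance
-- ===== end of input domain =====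

-- ===== PORT A =====
-- B replaces A's per-step rescan of the whole crosswalk map by a reverse index built once,
-- then follows the chain iteratively by dictionary lookup (objective: alternative algorithm).
-- Note: the Python function mutates its `visited` set argument (both A and B mutate it identically);
-- the equivalence proved here is about the return value.

-- A's inner `for new_id, _ in mappings: if new_id == contract_id: return ...` scan over the items
def pvScanA (cid : String) : List (String × List (String × String)) → Option String
  | [] => none
  | (old_id, mappings) :: rest =>
    if mappings.any (fun p => p.1 == cid) then some old_id
    else pvScanA cid rest

-- A's recursion; fuel is only a totality guard (crosswalk_map.length + 2 always suffices:
-- after the first step every id is a map key and each id is added to visited before recursing)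
def pvRootA (m : List (String × List (String × String))) : Nat → String → PySem.Set String → String
  | 0, cid, _ => cid
  | fuel+1, cid, vis =>
    if PySem.Set.contains vis cid then cid
    else
      match pvScanA cid m with
      | some old_id => pvRootA m fuel old_id (PySem.Set.add vis cid)
      | none => cid

def find_entity_root (contract_id : String) (crosswalk_map : List (String × List (String × String))) (visited : Option (List String)) : String :=
  let vis : PySem.Set String :=
    match visited with
    | none => PySem.Set.empty
    | some v => PySem.Set.ofList v
  pvRootA crosswalk_map (crosswalk_map.length + 2) contract_id vis

-- ===== PORT B =====
-- reverse index: new_id -> old_id of its first occurrence (first match wins)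
def pvRevIndex (m : List (String × List (String × String))) : PySem.Dict String String :=
  m.foldl
    (fun d e =>
      e.2.foldl (fun d q => if d.contains q.1 then d else d.insert q.1 e.1) d)
    PySem.Dict.empty

-- B's while loop; fuel is only a totality guard
def pvRootB (rev : PySem.Dict String String) : Nat → String → PySem.Set String → String
  | 0, cid, _ => cid
  | fuel+1, cid, vis =>
    if PySem.Set.contains vis cid then cid
    else
      let vis' := PySem.Set.add vis cid
      match rev.get? cid with
      | some old_id => pvRootB rev fuel old_id vis'
      | none => cid

def find_entity_root_alt (contract_id : String) (crosswalk_map : List (String × List (String × String))) (visited : Option (List String)) : String :=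
  let vis : PySem.Set String :=
    match visited with
    | none => PySem.Set.empty
    | some v => PySem.Set.ofList v
  pvRootB (pvRevIndex crosswalk_map) (crosswalk_map.length + 2) contract_id vis

-- ===== PRECONDITION & SPEC =====
def Spec_find_entity_root (contract_id : String) (crosswalk_map : List (String × List (String × String))) (visited : Option (List String)) (out : String) : Prop := out = find_entity_root_alt contract_id crosswalk_map visited
instance (contract_id : String) (crosswalk_map : List (String × List (String × String))) (visited : Option (List String)) (out : String) : Decidable (Spec_find_entity_root contract_id crosswalk_map visited out) := by unfold Spec_find_entity_root; infer_instance

-- ===== CLAIM (what is proved, stated in full; the proofs are below) =====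
def Claim_equal_find_entity_root : Prop := ∀ (contract_id : String) (crosswalk_map : List (String × List (String × String))) (visited : Option (List String)), Dom_find_entity_root contract_id crosswalk_map visited → Spec_find_entity_root contract_id crosswalk_map visited (find_entity_root contract_id crosswalk_map visited)

-- ===== LEMMAS AND PROOFS =====

-- one crosswalk entry folded into the index answers `cid` like the scan of its mappings
lemma get?_foldl_entry (old : String) (cid : String) :
    ∀ (maps : List (String × String)) (d : PySem.Dict String String),
      (maps.foldl (fun d q => if d.contains q.1 then d else d.insert q.1 old) d).get? cid
        = (d.get? cid).or (if maps.any (fun p => p.1 == cid) then some old else none) := by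
  intro maps
  induction maps with
  | nil => intro d; simp [List.foldl]
  | cons q rest ih =>
    intro d
    simp only [List.foldl, List.any_cons]
    by_cases hq : q.1 = cid
    · subst hq
      by_cases hc : d.contains q.1 = true
      · rw [if_pos hc, ih d]
        have : (d.get? q.1).isSome := by
          rw [← PySem.Dict.contains_eq_isSome_get?]; exact hc
        cases hg : d.get? q.1 with
        | none => rw [hg] at this; simp at this
        | some v => simp
      · rw [if_neg hc, ih]
        rw [PySem.Dict.get?_insert_self]
        have hg : d.get? q.1 = none := by
          rw [PySem.Dict.contains_eq_isSome_get?] at hc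
          cases h : d.get? q.1 <;> simp [h] at hc ⊢
        simp [hg]
    · have hbeq : (q.1 == cid) = false := by simp [hq]
      simp only [hbeq, Bool.false_or]
      by_cases hc : d.contains q.1 = true
      · rw [if_pos hc, ih d]
      · rw [if_neg hc, ih]
        rw [PySem.Dict.get?_insert_of_ne d old (Ne.symm hq)]
  
-- the reverse index looked up at `cid` is exactly A's first-match scan
lemma get?_revIndex_eq_scan (cid : String) :
    ∀ (m : List (String × List (String × String))) (d : PySem.Dict String String),
      (m.foldl (fun d e => e.2.foldl (fun d q => if d.contains q.1 then d else d.insert q.1 e.1) d) d).get? cid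
        = (d.get? cid).or (pvScanA cid m) := by
  intro m
  induction m with
  | nil => intro d; simp [List.foldl, pvScanA]
  | cons e rest ih =>
    intro d
    simp only [List.foldl, pvScanA]
    rw [ih, get?_foldl_entry]
    cases hg : d.get? cid with
    | some v => simp
    | none =>
      simp only [Option.or]
      split_ifs with h <;> simp

lemma revIndex_get? (m : List (String × List (String × String))) (cid : String) :
    (pvRevIndex m).get? cid = pvScanA cid m := by
  unfold pvRevIndex
  rw [get?_revIndex_eq_scan]
  simp [PySem.Dict.get?_empty]

-- with the lookup rewritten, the two loops are the same recursion
lemma rootA_eq_rootB (m : List (String × List (String × String))) :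
    ∀ (fuel : Nat) (cid : String) (vis : PySem.Set String),
      pvRootA m fuel cid vis = pvRootB (pvRevIndex m) fuel cid vis := by
  intro fuel
  induction fuel with
  | zero => intro cid vis; rfl
  | succ n ih =>
    intro cid vis
    simp only [pvRootA, pvRootB, revIndex_get? m cid]
    split_ifs with h
    · rfl
    · cases pvScanA cid m with
      | none => rfl
      | some old => exact ih old (PySem.Set.add vis cid)

-- ===== VERDICT (by name: the statement is the Claim_ definition above) =====
theorem find_entity_root_spec : Claim_equal_find_entity_root := by
  intro contract_id crosswalk_map visited _
  unfold Spec_find_entity_root find_entity_root find_entity_root_alt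
  cases visited <;> simp [rootA_eq_rootB]
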